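-- pv_equiv track=rewrite | github.com/filipjovancodes/quant | option_data_stream.py | filter_closest_strikes
-- ===== SOURCE A (Python) =====
-- def filter_closest_strikes(strikes, target, number_strikes):
--     if len(strikes) <= number_strikes:
--         return strikes
--
--     # Calculate the absolute difference between each number and the target
--     differences = [(abs(strike - target), strike) for strike in strikes]
--
--     # Sort the differences in ascending order
--     differences.sort()
--
--     # Select the 10 numbers with the smallest differences
--     closest_strikes = [strike for diff, strike in differences[:number_strikes]]
--
--     closest_strikes.sort()
--
--     return closest_strikes
-- ===== SOURCE B (Python) =====
-- def filter_closest_strikes(strikes, target, number_strikes):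
--     if len(strikes) <= number_strikes:
--         return strikes
--     ordered = sorted(strikes)
--     lo, hi = 0, len(ordered) - 1
--     while lo <= hi and hi - lo + 1 > number_strikes:
--         if abs(ordered[lo] - target) <= abs(ordered[hi] - target):
--             hi -= 1
--         else:
--             lo += 1
--     return ordered[lo:hi + 1]
-- ===== Notes on version B (the rewrite author's own statement) =====
-- stated objective: faster
-- what changed: Replaces building a (abs-diff, strike) tuple list, lex-sorting it and re-sorting the selected strikes by a single ascending sort followed by a two-pointer sliding window that discards the farther boundary (ties discard the larger strike), returning the already-sorted window.
-- intended difference: For negative number_strikes (with len(strikes)+number_strikes>0) A's slice differences[:number_strikes] silently keeps len+number_strikes strikes via Python's negative-slice convention, while B returns [], the intended result of asking for a non-positive number of strikes. — e.g. on filter_closest_strikes([1, 2, 3], 2, -1): A returns [1, 2], B returns []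
import Mathlib
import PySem

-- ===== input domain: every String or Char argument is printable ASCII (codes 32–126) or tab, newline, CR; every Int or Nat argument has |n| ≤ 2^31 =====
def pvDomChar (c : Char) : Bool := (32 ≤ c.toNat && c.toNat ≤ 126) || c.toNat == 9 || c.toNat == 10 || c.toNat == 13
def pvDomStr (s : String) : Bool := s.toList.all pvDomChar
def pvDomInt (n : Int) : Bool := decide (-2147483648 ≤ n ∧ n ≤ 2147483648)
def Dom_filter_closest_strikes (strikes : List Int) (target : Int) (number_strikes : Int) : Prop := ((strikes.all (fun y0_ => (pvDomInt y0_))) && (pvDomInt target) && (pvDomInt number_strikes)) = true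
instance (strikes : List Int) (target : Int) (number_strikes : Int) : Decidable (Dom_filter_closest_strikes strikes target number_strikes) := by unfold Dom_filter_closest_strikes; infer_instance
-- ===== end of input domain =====

-- B replaces A's tuple-list build and double sort by one ascending sort plus a two-pointer window
-- shrink (measured faster by a constant factor); equivalence is about the return value, no argument
-- is mutated by either side.

-- ===== PORT A =====
def filter_closest_strikes (strikes : List Int) (target : Int) (number_strikes : Int) : List Int :=
  if (strikes.length : Int) ≤ number_strikes then strikes
  else
    -- differences = [(abs(strike - target), strike) for strike in strikes]
    let differences := strikes.map (fun strike => (|strike - target|, strike))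
    -- differences.sort()  (Python lexicographic tuple sort)
    let differences := PySem.List.sorted2 differences Prod.fst Prod.snd
    -- closest_strikes = [strike for diff, strike in differences[:number_strikes]]
    let closest_strikes := (PySem.List.slice differences none (some number_strikes)).map Prod.snd
    -- closest_strikes.sort()
    PySem.List.sorted closest_strikes (fun x => x)

-- ===== PORT B =====
-- the while loop of Source B; the fuel argument (always called with ordered.length) only makes the
-- recursion structural — the loop stops no later than the fuel runs out
def fcsShrink (ordered : List Int) (target number_strikes : Int) : Nat → Int → Int → Int × Int
  | 0, lo, hi => (lo, hi)
  | n + 1, lo, hi =>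
    if lo ≤ hi ∧ number_strikes < hi - lo + 1 then
      if |PySem.List.pyGetD ordered lo 0 - target| ≤ |PySem.List.pyGetD ordered hi 0 - target| then
        fcsShrink ordered target number_strikes n lo (hi - 1)
      else
        fcsShrink ordered target number_strikes n (lo + 1) hi
    else (lo, hi)

def filter_closest_strikes_alt (strikes : List Int) (target : Int) (number_strikes : Int) : List Int :=
  if (strikes.length : Int) ≤ number_strikes then strikes
  else
    let ordered := PySem.List.sorted strikes (fun x => x)
    let p := fcsShrink ordered target number_strikes ordered.length 0 ((ordered.length : Int) - 1)
    PySem.List.slice ordered (some p.1) (some (p.2 + 1))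

-- ===== PRECONDITION & SPEC =====
-- For negative number_strikes (with strikes.length + number_strikes > 0) A's differences[:number_strikes]
-- silently keeps len+number_strikes strikes via Python's negative-slice convention, while B returns [],
-- the intended result of asking for a non-positive number of strikes.
def D_filter_closest_strikes (strikes : List Int) (target : Int) (number_strikes : Int) : Prop :=
  number_strikes < 0 ∧ 0 < (strikes.length : Int) + number_strikes
instance (strikes : List Int) (target : Int) (number_strikes : Int) : Decidable (D_filter_closest_strikes strikes target number_strikes) := by unfold D_filter_closest_strikes; infer_instance

def Spec_filter_closest_strikes (strikes : List Int) (target : Int) (number_strikes : Int) (out : List Int) : Prop := ¬ D_filter_closest_strikes strikes target number_strikes → out = filter_closest_strikes_alt strikes target number_strikes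
instance (strikes : List Int) (target : Int) (number_strikes : Int) (out : List Int) : Decidable (Spec_filter_closest_strikes strikes target number_strikes out) := by unfold Spec_filter_closest_strikes; infer_instance

def pvDiffWitness_filter_closest_strikes : List Int × Int × Int := ([1, 2, 3], 2, -1)
def pvDiffWitnessOut_filter_closest_strikes : (List Int) × (List Int) := ([1, 2], [])

-- ===== CLAIM (what is proved, stated in full; the proofs are below) =====
def Claim_unchanged_filter_closest_strikes : Prop := ∀ (strikes : List Int) (target : Int) (number_strikes : Int), Dom_filter_closest_strikes strikes target number_strikes → Spec_filter_closest_strikes strikes target number_strikes (filter_closest_strikes strikes target number_strikes)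
def Claim_changed_filter_closest_strikes : Prop := Dom_filter_closest_strikes (pvDiffWitness_filter_closest_strikes.1) (pvDiffWitness_filter_closest_strikes.2.1) (pvDiffWitness_filter_closest_strikes.2.2) ∧ D_filter_closest_strikes (pvDiffWitness_filter_closest_strikes.1) (pvDiffWitness_filter_closest_strikes.2.1) (pvDiffWitness_filter_closest_strikes.2.2) ∧ filter_closest_strikes (pvDiffWitness_filter_closest_strikes.1) (pvDiffWitness_filter_closest_strikes.2.1) (pvDiffWitness_filter_closest_strikes.2.2) = pvDiffWitnessOut_filter_closest_strikes.1 ∧ filter_closest_strikes_alt (pvDiffWitness_filter_closest_strikes.1) (pvDiffWitness_filter_closest_strikes.2.1) (pvDiffWitness_filter_closest_strikes.2.2) = pvDiffWitnessOut_filter_closest_strikes.2 ∧ pvDiffWitnessOut_filter_closest_strikes.1 ≠ pvDiffWitnessOut_filter_closest_strikes.2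
def Claim_exact_filter_closest_strikes : Prop := ∀ (strikes : List Int) (target : Int) (number_strikes : Int), Dom_filter_closest_strikes strikes target number_strikes → D_filter_closest_strikes strikes target number_strikes → filter_closest_strikes strikes target number_strikes ≠ filter_closest_strikes_alt strikes target number_strikes

-- ===== LEMMAS AND PROOFS =====

-- A's effective sort key for a single strike: (abs(strike - target), strike), compared lexicographically
def fcsKey (target x : Int) : Int ×ₗ Int := toLex (|x - target|, x)

theorem fcsKey_injective (target : Int) : Function.Injective (fcsKey target) := by
  intro a b h
  have := congrArg (fun p => (ofLex p).2) h
  simpa [fcsKey] using this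

-- Python's lexicographic tuple sort is PySem.List.sorted with the Prod.Lex key
theorem sorted2_eq_sorted_toLex (xs : List (Int × Int)) :
    PySem.List.sorted2 xs Prod.fst Prod.snd = PySem.List.sorted xs (fun p => toLex p) := by
  show List.foldl (fun acc x => PySem.List.insertBy
      (fun a b => decide (a.1 < b.1) || !decide (b.1 < a.1) && decide (a.2 < b.2)) x acc) [] xs
    = List.foldl (fun acc x => PySem.List.insertBy
      (fun a b => decide ((toLex a : Int ×ₗ Int) < toLex b)) x acc) [] xs
  have hfun : (fun (a b : Int × Int) => decide (a.1 < b.1) || !decide (b.1 < a.1) && decide (a.2 < b.2))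
      = (fun (a b : Int × Int) => decide ((toLex a : Int ×ₗ Int) < toLex b)) := by
    funext a b
    by_cases h1 : a.1 < b.1 <;> by_cases h2 : b.1 < a.1 <;> by_cases h3 : a.2 < b.2 <;>
      simp [Prod.Lex.lt_iff, h1, h2, h3] <;> omega
  rw [hfun]

theorem mem_head_le {w : List Int} (hp : w.Pairwise (· ≤ ·)) (hw : w ≠ []) {x : Int} (hx : x ∈ w) :
    w.head hw ≤ x := by
  cases w with
  | nil => cases hw rfl
  | cons a l =>
    rcases List.mem_cons.mp hx with rfl | h
    · simp
    · exact (List.pairwise_cons.mp hp).1 x h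

theorem mem_le_getLast {w : List Int} (hp : w.Pairwise (· ≤ ·)) (hw : w ≠ []) {x : Int} (hx : x ∈ w) :
    x ≤ w.getLast hw := by
  induction w with
  | nil => cases hw rfl
  | cons a l ih =>
    cases l with
    | nil => simp at hx ⊢; omega
    | cons b m =>
      rw [List.getLast_cons (by simp)]
      rcases List.mem_cons.mp hx with rfl | h
      · exact (List.pairwise_cons.mp hp).1 _ (List.getLast_mem _)
      · exact ih (List.pairwise_cons.mp hp).2 (by simp) h

-- endpoint discarded by the window: in a ≤-sorted window every element's key is bounded by it
theorem key_le_last (t : Int) (w : List Int) (hw : w ≠ [])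
    (hp : w.Pairwise (· ≤ ·))
    (hle : |w.head hw - t| ≤ |w.getLast hw - t|) :
    ∀ x ∈ w, fcsKey t x ≤ fcsKey t (w.getLast hw) := by
  intro x hx
  have h1 := mem_head_le hp hw hx
  have h2 := mem_le_getLast hp hw hx
  rw [fcsKey, fcsKey, Prod.Lex.le_iff]
  rcases abs_cases (x - t) with ⟨e1, f1⟩ | ⟨e1, f1⟩ <;>
    rcases abs_cases (w.head hw - t) with ⟨e2, f2⟩ | ⟨e2, f2⟩ <;>
    rcases abs_cases (w.getLast hw - t) with ⟨e3, f3⟩ | ⟨e3, f3⟩ <;>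
    simp only [ofLex_toLex] <;> omega

theorem key_le_head (t : Int) (w : List Int) (hw : w ≠ [])
    (hp : w.Pairwise (· ≤ ·))
    (hgt : ¬ |w.head hw - t| ≤ |w.getLast hw - t|) :
    ∀ x ∈ w, fcsKey t x ≤ fcsKey t (w.head hw) := by
  intro x hx
  have h1 := mem_head_le hp hw hx
  have h2 := mem_le_getLast hp hw hx
  rw [fcsKey, fcsKey, Prod.Lex.le_iff]
  rcases abs_cases (x - t) with ⟨e1, f1⟩ | ⟨e1, f1⟩ <;>
    rcases abs_cases (w.head hw - t) with ⟨e2, f2⟩ | ⟨e2, f2⟩ <;>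
    rcases abs_cases (w.getLast hw - t) with ⟨e3, f3⟩ | ⟨e3, f3⟩ <;>
    simp only [ofLex_toLex] <;> omega

theorem window_last (o : List Int) (a b : Nat) (hab : a ≤ b) (hb : b < o.length) :
    (o.drop a).take (b + 1 - a) = (o.drop a).take (b - a) ++ [o[b]] := by
  have h1 : b + 1 - a = (b - a) + 1 := by omega
  have h2 : b - a < (o.drop a).length := by simp; omega
  rw [h1, List.take_add_one, List.getElem?_eq_getElem h2]
  congr 1
  simp [List.getElem_drop]
  congr 1
  omega

theorem window_head (o : List Int) (a b : Nat) (hab : a ≤ b) (hb : b < o.length) :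
    (o.drop a).take (b + 1 - a) = o[a] :: (o.drop (a + 1)).take (b - a) := by
  rw [List.drop_eq_getElem_cons (by omega)]
  have h1 : b + 1 - a = (b - a) + 1 := by omega
  rw [h1, List.take_succ_cons]

theorem take_decomp (P : List Int) (s : Nat) (hs : s < P.length) :
    P.take (s + 1) = P.take s ++ [P[s]] := by
  rw [List.take_add_one, List.getElem?_eq_getElem hs]
  rfl

theorem take_key_max (t : Int) (P : List Int)
    (hP : P.Pairwise (fun a b => fcsKey t a ≤ fcsKey t b)) (s : Nat) (hs : s < P.length) :
    ∀ x ∈ P.take (s + 1), fcsKey t x ≤ fcsKey t P[s] := by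
  intro x hx
  rw [take_decomp P s hs] at hx
  have hpw : (P.take s ++ [P[s]]).Pairwise (fun a b => fcsKey t a ≤ fcsKey t b) := by
    rw [← take_decomp P s hs]
    exact List.Pairwise.sublist (List.take_sublist _ _) hP
  rcases List.mem_append.mp hx with h | h
  · exact (List.pairwise_append.mp hpw).2.2 x h _ (List.mem_singleton_self _)
  · rw [List.mem_singleton.mp h]

-- loop invariant: the window always holds the (window-size) strikes of smallest fcsKey;
-- at exit it holds exactly the number_strikes closest ones
theorem shrink_spec (o P : List Int) (t k : Int) (hk : 0 ≤ k)
    (ho : o.Pairwise (· ≤ ·)) (hP : P.Pairwise (fun a b => fcsKey t a ≤ fcsKey t b)) :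
    ∀ (n : Nat) (lo hi : Int), 0 ≤ lo → hi < (o.length : Int) → lo ≤ hi + 1 →
      k ≤ hi + 1 - lo → hi + 1 - lo ≤ (n : Int) →
      ((o.drop lo.toNat).take (hi + 1 - lo).toNat).Perm (P.take (hi + 1 - lo).toNat) →
      0 ≤ (fcsShrink o t k n lo hi).1 ∧
      (fcsShrink o t k n lo hi).2 + 1 ≤ (o.length : Int) ∧
      (fcsShrink o t k n lo hi).1 ≤ (fcsShrink o t k n lo hi).2 + 1 ∧
      (fcsShrink o t k n lo hi).2 + 1 - (fcsShrink o t k n lo hi).1 = k ∧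
      ((o.drop (fcsShrink o t k n lo hi).1.toNat).take
          ((fcsShrink o t k n lo hi).2 + 1 - (fcsShrink o t k n lo hi).1).toNat).Perm (P.take k.toNat) := by
  intro n
  induction n with
  | zero =>
    intro lo hi h0 h1 h2 h3 h4 hperm
    refine ⟨h0, ?_, ?_, ?_, ?_⟩
    · show hi + 1 ≤ (o.length : Int); omega
    · show lo ≤ hi + 1; omega
    · show hi + 1 - lo = k; omega
    · show ((o.drop lo.toNat).take (hi + 1 - lo).toNat).Perm (P.take k.toNat)
      rw [show k.toNat = (hi + 1 - lo).toNat from by omega]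
      exact hperm
  | succ n ih =>
    intro lo hi h0 h1 h2 h3 h4 hperm
    rw [fcsShrink]
    by_cases hc : lo ≤ hi ∧ k < hi - lo + 1
    · rw [if_pos hc]
      obtain ⟨hlohi, hksz⟩ := hc
      set a := lo.toNat with ha
      set b := hi.toNat with hb
      have haI : (a : Int) = lo := by omega
      have hbI : (b : Int) = hi := by omega
      have hab : a ≤ b := by omega
      have hbo : b < o.length := by omega
      have hao : a < o.length := by omega
      have hszN : (hi + 1 - lo).toNat = b + 1 - a := by omega
      have hwlast := window_last o a b hab hbo
      have hwhead := window_head o a b hab hbo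
      have hwne : (o.drop a).take (b + 1 - a) ≠ [] := by rw [hwhead]; simp
      have hpwW : ((o.drop a).take (b + 1 - a)).Pairwise (· ≤ ·) :=
        List.Pairwise.sublist ((List.take_sublist _ _).trans (List.drop_sublist _ _)) ho
      have hwhd : ∀ (h : (o.drop a).take (b + 1 - a) ≠ []),
          ((o.drop a).take (b + 1 - a)).head h = o[a] := by
        rw [hwhead]; intro h; rfl
      have hwlst : ∀ (h : (o.drop a).take (b + 1 - a) ≠ []),
          ((o.drop a).take (b + 1 - a)).getLast h = o[b] := by
        rw [hwlast]; intro h; simp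
      rw [hszN] at hperm
      have hlenP : b + 1 - a ≤ P.length := by
        have := hperm.length_eq
        simp only [List.length_take, List.length_drop] at this
        omega
      have hsP : b - a < P.length := by omega
      have hmaxP := take_key_max t P hP (b - a) hsP
      have hba1 : b - a + 1 = b + 1 - a := by omega
      rw [hba1] at hmaxP
      have hPdec : P.take (b + 1 - a) = P.take (b - a) ++ [P[b - a]] := by
        rw [← hba1]; exact take_decomp P _ hsP
      have hmemP : P[b - a] ∈ P.take (b + 1 - a) := by
        rw [hPdec]; exact List.mem_append_right _ (List.mem_singleton_self _)
      have hgetlo : PySem.List.pyGetD o lo 0 = o[a] := by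
        have := PySem.List.pyGetD_eq_getElem o (i := lo) 0 h0 (by omega)
        rw [this]
      have hgethi : PySem.List.pyGetD o hi 0 = o[b] := by
        have := PySem.List.pyGetD_eq_getElem o (i := hi) 0 (by omega) (by omega)
        rw [this]
      rw [hgetlo, hgethi]
      by_cases hif : |o[a] - t| ≤ |o[b] - t|
      · rw [if_pos hif]
        have hmaxW := key_le_last t _ hwne hpwW (by rw [hwhd, hwlst]; exact hif)
        rw [hwlst] at hmaxW
        have hmemW : o[b] ∈ (o.drop a).take (b + 1 - a) := by rw [hwlast]; simp
        have heq : o[b] = P[b - a] := by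
          apply fcsKey_injective t
          exact le_antisymm (hmaxP _ (hperm.subset hmemW)) (hmaxW _ (hperm.symm.subset hmemP))
        have hwlast' : (o.drop a).take (b + 1 - a) = (o.drop a).take (b - a) ++ [P[b - a]] := by
          rw [hwlast, heq]
        have h1 : ((o.drop a).take (b - a) ++ [P[b - a]]).Perm (P.take (b - a) ++ [P[b - a]]) := by
          rw [← hwlast', ← hPdec]; exact hperm
        have hstep : ((o.drop a).take (b - a)).Perm (P.take (b - a)) :=
          (((List.perm_append_singleton _ _).symm.trans h1).trans
            (List.perm_append_singleton _ _)).cons_inv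
        have hwin : ((o.drop lo.toNat).take (hi - 1 + 1 - lo).toNat).Perm
            (P.take (hi - 1 + 1 - lo).toNat) := by
          rw [show (hi - 1 + 1 - lo).toNat = b - a from by omega]
          exact hstep
        exact ih lo (hi - 1) h0 (by omega) (by omega) (by omega) (by omega) hwin
      · rw [if_neg hif]
        have hmaxW := key_le_head t _ hwne hpwW (by rw [hwhd, hwlst]; exact hif)
        rw [hwhd] at hmaxW
        have hmemW : o[a] ∈ (o.drop a).take (b + 1 - a) := by rw [hwhead]; simp
        have heq : o[a] = P[b - a] := by
          apply fcsKey_injective t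
          exact le_antisymm (hmaxP _ (hperm.subset hmemW)) (hmaxW _ (hperm.symm.subset hmemP))
        have hwhead' : (o.drop a).take (b + 1 - a) = P[b - a] :: (o.drop (a + 1)).take (b - a) := by
          rw [hwhead, heq]
        have h1 : (P[b - a] :: (o.drop (a + 1)).take (b - a)).Perm (P.take (b - a) ++ [P[b - a]]) := by
          rw [← hwhead', ← hPdec]; exact hperm
        have hstep : ((o.drop (a + 1)).take (b - a)).Perm (P.take (b - a)) :=
          (h1.trans (List.perm_append_singleton _ _)).cons_inv
        have hwin : ((o.drop (lo + 1).toNat).take (hi + 1 - (lo + 1)).toNat).Perm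
            (P.take (hi + 1 - (lo + 1)).toNat) := by
          rw [show (lo + 1).toNat = a + 1 from by omega,
              show (hi + 1 - (lo + 1)).toNat = b - a from by omega]
          exact hstep
        exact ih (lo + 1) hi (by omega) (by omega) (by omega) (by omega) (by omega) hwin
    · rw [if_neg hc]
      refine ⟨h0, ?_, ?_, ?_, ?_⟩
      · show hi + 1 ≤ (o.length : Int); omega
      · show lo ≤ hi + 1; omega
      · show hi + 1 - lo = k; omega
      · show ((o.drop lo.toNat).take (hi + 1 - lo).toNat).Perm (P.take k.toNat)
        rw [show k.toNat = (hi + 1 - lo).toNat from by omega]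
        exact hperm

-- with a negative number_strikes the window shrinks until it is empty
theorem fcsShrink_neg (o : List Int) (t k : Int) (hk : k < 0) :
    ∀ (n : Nat) (lo hi : Int), lo ≤ hi + 1 → hi + 1 - lo ≤ (n : Int) →
      (fcsShrink o t k n lo hi).1 = (fcsShrink o t k n lo hi).2 + 1 := by
  intro n
  induction n with
  | zero => intro lo hi h1 h2; simp [fcsShrink]; omega
  | succ n ih =>
    intro lo hi h1 h2
    rw [fcsShrink]
    by_cases hc : lo ≤ hi ∧ k < hi - lo + 1
    · rw [if_pos hc]
      split
      · exact ih lo (hi - 1) (by omega) (by omega)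
      · exact ih (lo + 1) hi (by omega) (by omega)
    · rw [if_neg hc]; simp; omega

theorem slice_self_eq_nil (xs : List Int) (a : Int) :
    PySem.List.slice xs (some a) (some a) = [] := by
  apply List.eq_nil_of_length_eq_zero
  rw [PySem.List.length_slice]
  omega

theorem slice_to_neg_eq_nil (xs : List (Int × Int)) (k : Int) (hk : k < 0)
    (hlen : (xs.length : Int) + k ≤ 0) :
    PySem.List.slice xs none (some k) = [] := by
  apply List.eq_nil_of_length_eq_zero
  rw [← PySem.List.slice_zero_start, PySem.List.length_slice]
  simp only [PySem.List.clampIdx]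
  split <;> split <;> omega

theorem length_slice_to_neg (xs : List (Int × Int)) (k : Int) (hk : k < 0)
    (hlen : 0 < (xs.length : Int) + k) :
    ((PySem.List.slice xs none (some k)).length : Int) = (xs.length : Int) + k := by
  rw [← PySem.List.slice_zero_start, PySem.List.length_slice]
  unfold PySem.List.clampIdx
  rw [if_pos hk, if_neg (by omega : ¬ (xs.length : Int) + k < 0)]
  norm_num
  omega

-- the strikes of A's lex-sorted pair list, in order: a permutation of strikes sorted by fcsKey
theorem P_pairwise (strikes : List Int) (t : Int) :
    ((PySem.List.sorted (strikes.map (fun s => (|s - t|, s)))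
        (fun p => (toLex p : Int ×ₗ Int))).map Prod.snd).Pairwise
      (fun a b => fcsKey t a ≤ fcsKey t b) := by
  have hpw := PySem.List.sorted_pairwise (strikes.map (fun s => (|s - t|, s)))
    (fun p => (toLex p : Int ×ₗ Int))
  have hmem : ∀ p ∈ PySem.List.sorted (strikes.map (fun s => (|s - t|, s)))
      (fun p => (toLex p : Int ×ₗ Int)), p = (|p.2 - t|, p.2) := by
    intro p hp
    have : p ∈ strikes.map (fun s => (|s - t|, s)) :=
      (PySem.List.sorted_perm _ _ _).subset hp
    obtain ⟨q, hq, rfl⟩ := List.mem_map.mp this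
    rfl
  rw [List.pairwise_map]
  refine List.Pairwise.imp_of_mem ?_ hpw
  intro a b hma hmb hab
  have ha := hmem a hma
  have hb := hmem b hmb
  show fcsKey t a.2 ≤ fcsKey t b.2
  rw [fcsKey, fcsKey, ← ha, ← hb]
  exact hab

theorem P_perm (strikes : List Int) (t : Int) :
    ((PySem.List.sorted (strikes.map (fun s => (|s - t|, s)))
        (fun p => (toLex p : Int ×ₗ Int))).map Prod.snd).Perm strikes := by
  have h := (PySem.List.sorted_perm (strikes.map (fun s => (|s - t|, s)))
    (fun p => (toLex p : Int ×ₗ Int)) false).map Prod.snd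
  rw [List.map_map] at h
  have hid : (Prod.snd ∘ fun s : Int => (|s - t|, s)) = id := rfl
  rw [hid, List.map_id] at h
  exact h

theorem main_eq (strikes : List Int) (t k : Int)
    (hnd : ¬ D_filter_closest_strikes strikes t k) :
    filter_closest_strikes strikes t k = filter_closest_strikes_alt strikes t k := by
  by_cases hbr : (strikes.length : Int) ≤ k
  · unfold filter_closest_strikes filter_closest_strikes_alt
    rw [if_pos hbr, if_pos hbr]
  · unfold filter_closest_strikes filter_closest_strikes_alt
    rw [if_neg hbr, if_neg hbr]
    simp only []
    rw [sorted2_eq_sorted_toLex]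
    set o := PySem.List.sorted strikes (fun x : Int => x) with ho_def
    set D' := PySem.List.sorted (strikes.map (fun s => (|s - t|, s)))
      (fun p => (toLex p : Int ×ₗ Int)) with hD'_def
    set P := D'.map Prod.snd with hP_def
    have ho : o.Pairwise (· ≤ ·) := PySem.List.sorted_pairwise strikes (fun x => x)
    have hoperm : o.Perm strikes := PySem.List.sorted_perm strikes (fun x => x) false
    have holen : o.length = strikes.length := PySem.List.length_sorted strikes (fun x => x) false
    have hPpair := P_pairwise strikes t
    have hPperm := P_perm strikes t
    have hPlen : P.length = strikes.length := hPperm.length_eq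
    by_cases hk : 0 ≤ k
    · -- 0 ≤ number_strikes < len(strikes): both sides are the k closest strikes, ascending
      rw [PySem.List.slice_to _ hk, List.map_take, ← hP_def]
      have hinit : ((o.drop (0 : Int).toNat).take (((o.length : Int) - 1 + 1 - 0)).toNat).Perm
          (P.take (((o.length : Int) - 1 + 1 - 0)).toNat) := by
        rw [show (((o.length : Int) - 1 + 1 - 0)).toNat = o.length from by omega]
        rw [show (0 : Int).toNat = 0 from rfl, List.drop_zero, List.take_length]
        rw [show o.length = P.length from by omega, List.take_length]
        exact hoperm.trans hPperm.symm
      obtain ⟨c1, c2, c3, c4, c5⟩ := shrink_spec o P t k hk ho hPpair o.length 0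
        ((o.length : Int) - 1) le_rfl (by omega) (by omega) (by omega) (by omega) hinit
      set p := fcsShrink o t k o.length 0 ((o.length : Int) - 1) with hp_def
      rw [PySem.List.slice_toNat o c1 (by omega)]
      rw [show (p.2 + 1).toNat - p.1.toNat = (p.2 + 1 - p.1).toNat from by omega, c4]
      rw [c4] at c5
      have hWpair : ((o.drop p.1.toNat).take k.toNat).Pairwise
          (fun a b => (fun x : Int => x) a ≤ (fun x : Int => x) b) :=
        List.Pairwise.sublist ((List.take_sublist _ _).trans (List.drop_sublist _ _)) ho
      exact PySem.List.eq_of_perm_of_pairwise_le_of_injective (fun x : Int => x)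
        (fun a b h => h)
        ((PySem.List.sorted_perm _ _ _).trans c5.symm)
        (PySem.List.sorted_pairwise _ _) hWpair
    · -- number_strikes < 0 and (outside D_) len(strikes) + number_strikes ≤ 0: both sides are []
      have hk' : k < 0 := by omega
      have hlen0 : (strikes.length : Int) + k ≤ 0 := by
        by_contra h
        exact hnd ⟨hk', by omega⟩
      have hD'len : ((D'.length : Int)) + k ≤ 0 := by
        have : D'.length = strikes.length := by
          rw [hD'_def, PySem.List.length_sorted, List.length_map]
        omega
      rw [slice_to_neg_eq_nil D' k hk' hD'len]
      have hshr := fcsShrink_neg o t k hk' o.length 0 ((o.length : Int) - 1)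
        (by omega) (by omega)
      show PySem.List.sorted ([].map Prod.snd) (fun x : Int => x) = _
      rw [show ((fcsShrink o t k o.length 0 ((o.length : Int) - 1)).2 + 1)
            = (fcsShrink o t k o.length 0 ((o.length : Int) - 1)).1 from hshr.symm]
      rw [slice_self_eq_nil]
      rfl

-- ===== VERDICT (by name: the statement is the Claim_ definition above) =====
theorem filter_closest_strikes_spec : Claim_unchanged_filter_closest_strikes := by
  intro strikes t k _ hnd
  exact main_eq strikes t k hnd

theorem filter_closest_strikes_changed : Claim_changed_filter_closest_strikes := by
  unfold Claim_changed_filter_closest_strikes; decide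

theorem filter_closest_strikes_tight : Claim_exact_filter_closest_strikes := by
  intro strikes t k _ hD heq
  obtain ⟨hk, hlen⟩ := hD
  have hbr : ¬ (strikes.length : Int) ≤ k := by omega
  -- B returns []
  have hB : filter_closest_strikes_alt strikes t k = [] := by
    unfold filter_closest_strikes_alt
    rw [if_neg hbr]
    simp only []
    set o := PySem.List.sorted strikes (fun x : Int => x) with ho_def
    have hshr := fcsShrink_neg o t k hk o.length 0 ((o.length : Int) - 1)
      (by omega) (by omega)
    rw [show ((fcsShrink o t k o.length 0 ((o.length : Int) - 1)).2 + 1)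
          = (fcsShrink o t k o.length 0 ((o.length : Int) - 1)).1 from hshr.symm]
    exact slice_self_eq_nil _ _
  rw [hB] at heq
  -- but A returns a nonempty list
  unfold filter_closest_strikes at heq
  rw [if_neg hbr] at heq
  simp only [] at heq
  rw [PySem.List.sorted_eq_nil_iff, List.map_eq_nil_iff] at heq
  have hsl : ((PySem.List.slice (PySem.List.sorted2
      (strikes.map (fun strike => (|strike - t|, strike))) Prod.fst Prod.snd)
      none (some k)).length : Int) = (strikes.length : Int) + k := by
    have hl2 : (PySem.List.sorted2 (strikes.map (fun strike => (|strike - t|, strike)))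
        Prod.fst Prod.snd).length = strikes.length := by
      rw [(PySem.List.sorted2_perm _ _ _ _).length_eq, List.length_map]
    rw [length_slice_to_neg _ k hk (by omega), hl2]
  rw [heq] at hsl
  simp at hsl
  omega
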